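-- pv_equiv track=rewrite | github.com/dgottschalk03/dsci_550_a1 | dsci_550_a1/parsingFunctions.py | extractSequences
-- ===== SOURCE A (Python) =====
-- def extractSequences(tokens : list[str], sepChar: str) -> list[list[str]]:
--     '''
--     Takes plain text and returns groups of tokens separated by "sep"
--     Input:
--         [tokens]    - List of tokens
--         [sepChar]   - Character that separates sequences
--     Returns:
--         Sequences   - list of sentence broken into tokens
--     '''
--     Sequences = []
--     currentSequence = []
--
--     for token in tokens:
--         # Check for Punctuation #
--         if token == '.':
--         # Append Sentence to Res and Reset CurrentSequence #
--             currentSequence.append(token)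
--             Sequences.append(currentSequence)
--             currentSequence = []
--         else:
--             currentSequence.append(token)
--
--     return Sequences
-- ===== SOURCE B (Python) =====
-- def extractSequences(tokens: list[str], sepChar: str) -> list[list[str]]:
--     # Two-pass: collect the indices of '.' tokens, then cut the list into
--     # slices tokens[prev:i+1] between consecutive separator positions.
--     # Tokens after the last '.' are never covered by a slice, matching A.
--     seps = [i for i, t in enumerate(tokens) if t == '.']
--     out = []
--     prev = 0
--     for i in seps:
--         out.append(tokens[prev:i + 1])
--         prev = i + 1
--     return out
-- ===== Notes on version B (the rewrite author's own statement) =====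
-- stated objective: alternative
-- what changed: Replaces A's single accumulator loop (building the current sequence token by token) with an index-based scheme: one pass collects the positions of '.' tokens, then the result is produced by slicing tokens between consecutive separator positions.
import Mathlib
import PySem

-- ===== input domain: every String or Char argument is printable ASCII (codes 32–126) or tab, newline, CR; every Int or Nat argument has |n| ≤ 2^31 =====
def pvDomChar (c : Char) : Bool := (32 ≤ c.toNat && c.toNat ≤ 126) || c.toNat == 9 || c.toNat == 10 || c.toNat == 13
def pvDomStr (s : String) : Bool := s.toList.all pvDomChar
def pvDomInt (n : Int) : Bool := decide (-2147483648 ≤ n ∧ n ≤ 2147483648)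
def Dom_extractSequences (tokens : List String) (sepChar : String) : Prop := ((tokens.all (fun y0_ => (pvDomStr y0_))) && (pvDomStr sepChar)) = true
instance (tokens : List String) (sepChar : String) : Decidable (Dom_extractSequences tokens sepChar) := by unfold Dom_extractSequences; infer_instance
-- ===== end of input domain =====

-- ===== PORT A =====
-- B changes the decomposition only: indices of '.' collected first, then slices; same output, same cost.
def extractSequences (tokens : List String) (sepChar : String) : List (List String) :=
  (tokens.foldl
    (fun (st : List (List String) × List String) token =>
      if token == "." then (st.1 ++ [st.2 ++ [token]], [])
      else (st.1, st.2 ++ [token]))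
    ([], [])).1

-- ===== PORT B =====
-- seps = [i for i, t in enumerate(tokens) if t == '.']
def pvSeps (tokens : List String) : List Int :=
  ((PySem.List.enumerate tokens).filter (fun p => p.2 == ".")).map (·.1)

-- the 'for i in seps' loop: out.append(tokens[prev:i+1]); prev = i+1
def pvAltGo (tokens : List String) : Int → List Int → List (List String)
  | _, [] => []
  | prev, i :: is =>
      PySem.List.slice tokens (some prev) (some (i + 1)) :: pvAltGo tokens (i + 1) is

def extractSequences_alt (tokens : List String) (sepChar : String) : List (List String) :=
  pvAltGo tokens 0 (pvSeps tokens)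

-- ===== PRECONDITION & SPEC =====
def Spec_extractSequences (tokens : List String) (sepChar : String) (out : List (List String)) : Prop := out = extractSequences_alt tokens sepChar
instance (tokens : List String) (sepChar : String) (out : List (List String)) : Decidable (Spec_extractSequences tokens sepChar out) := by unfold Spec_extractSequences; infer_instance

-- ===== CLAIM (what is proved, stated in full; the proofs are below) =====
def Claim_equal_extractSequences : Prop := ∀ (tokens : List String) (sepChar : String), Dom_extractSequences tokens sepChar → Spec_extractSequences tokens sepChar (extractSequences tokens sepChar)

-- ===== LEMMAS AND PROOFS =====

-- clean reference recursion: the sequences emitted with current sequence `cur`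
def pvAux : List String → List String → List (List String)
  | _, [] => []
  | cur, t :: ts =>
      if t == "." then (cur ++ [t]) :: pvAux [] ts
      else pvAux (cur ++ [t]) ts

theorem pvA_loop (ts : List String) :
    ∀ (seqs : List (List String)) (cur : List String),
      (ts.foldl
        (fun (st : List (List String) × List String) token =>
          if token == "." then (st.1 ++ [st.2 ++ [token]], [])
          else (st.1, st.2 ++ [token]))
        (seqs, cur)).1 = seqs ++ pvAux cur ts := by
  induction ts with
  | nil => intro seqs cur; simp [pvAux]
  | cons t ts ih =>
      intro seqs cur
      rw [List.foldl_cons]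
      cases hb : (t == ".") with
      | true => rw [if_pos rfl, ih]; simp [pvAux, hb, List.append_assoc]
      | false => rw [if_neg (by simp), ih]; simp [pvAux, hb]

def pvSepsFrom (ts : List String) (s : Int) : List Int :=
  ((PySem.List.enumerate ts s).filter (fun p => p.2 == ".")).map (·.1)

theorem pvSepsFrom_cons (t : String) (ts : List String) (s : Int) :
    pvSepsFrom (t :: ts) s =
      if t == "." then s :: pvSepsFrom ts (s + 1) else pvSepsFrom ts (s + 1) := by
  by_cases h : t == "." <;> simp [pvSepsFrom, PySem.List.enumerate_cons, h]

theorem pvAltGo_eq_aux (ts : List String) :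
    ∀ (pre cur : List String),
      pvAltGo (pre ++ cur ++ ts) (pre.length : Int)
        (pvSepsFrom ts ((pre.length : Int) + (cur.length : Int))) = pvAux cur ts := by
  induction ts with
  | nil => intro pre cur; simp [pvSepsFrom, pvAltGo, pvAux, PySem.List.enumerate]
  | cons t ts ih =>
      intro pre cur
      rw [pvSepsFrom_cons]
      by_cases h : t == "."
      · have ht : t = "." := by simpa using h
        subst ht
        simp only [h, if_true, pvAltGo, pvAux]
        congr 1
        · -- the slice tokens[pre.length : pre.length+cur.length+1] = cur ++ ["."]
          have : ((pre.length : Int) + (cur.length : Int) + 1)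
              = ((pre.length + (cur.length + 1) : Nat) : Int) := by push_cast; ring_nf
          rw [this, PySem.List.slice_natCast]
          have e4 : pre.length + (cur.length + 1) - pre.length = cur.length + 1 := by omega
          rw [e4, List.append_assoc, List.drop_left,
            show ("." :: ts : List String) = ["."] ++ ts from rfl, ← List.append_assoc,
            List.take_left' (by simp)]
        · have h2 := ih (pre ++ cur ++ ["."]) []
          simp only [List.append_nil, List.length_append, List.length_cons,
            List.length_nil] at h2 ⊢
          have e1 : (pre ++ cur ++ ["."]) ++ ts = pre ++ cur ++ "." :: ts := by simp
          rw [e1] at h2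
          have e2 : ((pre.length + cur.length + 1 : Nat) : Int)
              = (pre.length : Int) + (cur.length : Int) + 1 := by push_cast; ring
          rw [e2] at h2
          simpa using h2
      · simp only [h, Bool.false_eq_true, if_false]
        have h2 := ih pre (cur ++ [t])
        have e1 : pre ++ (cur ++ [t]) ++ ts = pre ++ cur ++ t :: ts := by simp
        rw [e1] at h2
        have e2 : ((pre.length : Int) + ((cur ++ [t]).length : Int))
            = (pre.length : Int) + (cur.length : Int) + 1 := by
          simp [List.length_append]; push_cast; ring
        rw [e2] at h2
        rw [h2]
        simp [pvAux, h]

-- ===== VERDICT (by name: the statement is the Claim_ definition above) =====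
theorem extractSequences_spec : Claim_equal_extractSequences := by
  intro tokens sepChar _
  unfold Spec_extractSequences extractSequences extractSequences_alt
  rw [pvA_loop tokens [] []]
  have h := pvAltGo_eq_aux tokens [] []
  simp only [List.nil_append, List.length_nil, Nat.cast_zero, zero_add] at h
  have : pvSeps tokens = pvSepsFrom tokens 0 := rfl
  rw [this, h]
  simp
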